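-- pv_equiv track=rewrite | github.com/archishmanghos/DSA-Contests | Interviews/GFG/random-problems/Easy/Print-Diagonally/Print-Diagonally.py | downwardDigonal
-- ===== SOURCE A (Python) =====
-- def downwardDigonal(N, A):
--     ans, j, idx = [None for i in range(N * N)], 0, 0
--     for i in range(2 * N):
--         if i == N: continue
--         k, l = 0 if i < N else i % N, j
--         while k < N and l >= 0:
--             ans[idx] = A[k][l]
--             idx, k, l = idx + 1, k + 1, l - 1
--
--         j = j if j == N - 1 else j + 1
--
--     return ans
-- ===== SOURCE B (Python) =====
-- def downwardDigonal(N, A):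
--     # one row-major pass over the matrix: scatter each element into the bucket
--     # keyed by its anti-diagonal index r+c, then concatenate the buckets
--     buckets = [[] for _ in range(2 * N - 1)]
--     for r in range(N):
--         for c in range(N):
--             buckets[r + c].append(A[r][c])
--     out = []
--     for b in buckets:
--         out += b
--     return out
-- ===== Notes on version B (the rewrite author's own statement) =====
-- stated objective: alternative
-- what changed: B never walks a diagonal: it makes one row-major pass over the matrix, scattering each element A[r][c] into a bucket keyed by its anti-diagonal index r+c, and then concatenates the 2N-1 buckets; A instead runs a 2N-step loop with a ratcheting j state variable and an inner diagonal-walking while loop writing into a preallocated None array.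
-- outside the precondition, e.g. on downwardDigonal(-2, []): A returns [None, None, None, None], B returns []
import Mathlib
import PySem

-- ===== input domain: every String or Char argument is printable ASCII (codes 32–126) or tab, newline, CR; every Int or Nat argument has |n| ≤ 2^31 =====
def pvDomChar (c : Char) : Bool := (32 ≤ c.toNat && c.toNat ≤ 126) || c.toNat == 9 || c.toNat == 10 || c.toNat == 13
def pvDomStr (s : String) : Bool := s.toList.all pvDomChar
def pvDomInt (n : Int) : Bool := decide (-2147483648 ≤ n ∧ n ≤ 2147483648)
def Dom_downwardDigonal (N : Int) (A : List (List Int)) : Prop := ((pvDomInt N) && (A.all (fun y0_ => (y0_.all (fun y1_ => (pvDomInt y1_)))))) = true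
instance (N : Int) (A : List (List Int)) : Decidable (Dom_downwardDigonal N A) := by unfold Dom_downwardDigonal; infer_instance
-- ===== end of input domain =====

-- B replaces A's diagonal-walking state machine (range(2*N) loop, i==N skip, ratcheting
-- j, inner while, preallocated None array) by a bucket scatter: one row-major pass puts
-- each A[r][c] into bucket r+c, then the buckets are concatenated (objective: alternative).

-- ===== PORT A =====
-- A[k][l]; exact whenever 0 ≤ k,l and in range, which Pre_ guarantees on every access
def pvCellA (A : List (List Int)) (k l : Int) : Int :=
  PySem.List.pyGetD (PySem.List.pyGetD A k []) l 0

-- the inner 'while k < N and l >= 0' loop; ans[idx] = … as the total pySetD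
-- (exact: under Pre_ idx is always in range)
def pvWhileA (N : Int) (A : List (List Int)) (ans : List (Option Int)) (idx k l : Int) :
    List (Option Int) × Int :=
  if h : k < N ∧ 0 ≤ l then
    pvWhileA N A (PySem.List.pySetD ans idx (some (pvCellA A k l))) (idx + 1) (k + 1) (l - 1)
  else (ans, idx)
termination_by (l + 1).toNat
decreasing_by omega

-- one iteration of A's 'for i in range(2*N)' loop; state = (ans, j, idx)
def pvBodyA (N : Int) (A : List (List Int)) (st : List (Option Int) × Int × Int) (i : Int) :
    List (Option Int) × Int × Int :=
  if i = N then st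
  else
    let k : Int := if i < N then 0 else PySem.Int.mod i N
    let res := pvWhileA N A st.1 st.2.2 k st.2.1
    (res.1, if st.2.1 = N - 1 then st.2.1 else st.2.1 + 1, res.2)

def downwardDigonal (N : Int) (A : List (List Int)) : List Int :=
  -- ans = [None for i in range(N*N)]
  let ans0 : List (Option Int) := (PySem.List.pyRange 0 (N * N) 1).map (fun _ => none)
  let s := (PySem.List.pyRange 0 (2 * N) 1).foldl (pvBodyA N A) (ans0, 0, 0)
  -- 'return ans': under Pre_ every slot has been written, so the getD 0 never fires
  s.1.map (fun o => o.getD 0)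

-- ===== PORT B =====
-- A[r][c]; exact whenever in range, which Pre_ guarantees on every access
def pvCellB (A : List (List Int)) (r c : Int) : Int :=
  PySem.List.pyGetD (PySem.List.pyGetD A r []) c 0

-- buckets[i].append(v): read-modify-write of slot i (exact: under Pre_, i is in range)
def pvAppendAt (bs : List (List Int)) (i : Int) (v : Int) : List (List Int) :=
  PySem.List.pySetD bs i (PySem.List.pyGetD bs i [] ++ [v])

def downwardDigonal_alt (N : Int) (A : List (List Int)) : List Int :=
  -- buckets = [[] for _ in range(2*N-1)]
  let buckets0 : List (List Int) := (PySem.List.pyRange 0 (2 * N - 1) 1).map (fun _ => [])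
  -- for r in range(N): for c in range(N): buckets[r+c].append(A[r][c])
  let buckets := (PySem.List.pyRange 0 N 1).foldl (fun bs r =>
      (PySem.List.pyRange 0 N 1).foldl (fun bs' c =>
        pvAppendAt bs' (r + c) (pvCellB A r c)) bs) buckets0
  -- out = []; for b in buckets: out += b
  buckets.foldl (fun out b => out ++ b) []

-- ===== PRECONDITION & SPEC =====
-- Pre_ excludes N < 0 (A returns a list of None, not a value of List Int) and the
-- shapes on which A raises IndexError (fewer than N rows, or one of the first N rows
-- shorter than N); it is exactly the set of inputs where A returns a list of ints.
def Pre_downwardDigonal (N : Int) (A : List (List Int)) : Prop :=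
  0 ≤ N ∧ N.toNat ≤ A.length ∧ ∀ row ∈ A.take N.toNat, N.toNat ≤ row.length

instance (N : Int) (A : List (List Int)) : Decidable (Pre_downwardDigonal N A) := by
  unfold Pre_downwardDigonal; infer_instance

def pvWitness_downwardDigonal : Int × List (List Int) := (2, [[1, 2], [3, 4]])

def Spec_downwardDigonal (N : Int) (A : List (List Int)) (out : List Int) : Prop := out = downwardDigonal_alt N A
instance (N : Int) (A : List (List Int)) (out : List Int) : Decidable (Spec_downwardDigonal N A out) := by unfold Spec_downwardDigonal; infer_instance

-- ===== CLAIM (what is proved, stated in full; the proofs are below) =====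
def Claim_equal_downwardDigonal : Prop := ∀ (N : Int) (A : List (List Int)), Dom_downwardDigonal N A → Pre_downwardDigonal N A → Spec_downwardDigonal N A (downwardDigonal N A)

-- ===== LEMMAS AND PROOFS =====

-- The common characterisation both ports are reduced to: the concatenation, over the
-- diagonal index d, of the values on anti-diagonal d (row increasing).

-- the values A's inner while loop visits, starting at (k, l)
def pvDvals (N : Int) (A : List (List Int)) (k l : Int) : List Int :=
  if h : k < N ∧ 0 ≤ l then pvCellA A k l :: pvDvals N A (k + 1) (l - 1) else []
termination_by (l + 1).toNat
decreasing_by omega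

def pvDiagCat (N : Int) (A : List (List Int)) : List Int :=
  (PySem.List.pyRange 0 (2 * N - 1) 1).flatMap
    (fun d => pvDvals N A (max 0 (d - N + 1)) (d - max 0 (d - N + 1)))

-- ---- A-side: downwardDigonal = pvDiagCat ----

-- sequential writes ans[idx], ans[idx+1], …
def pvWriteSeq (ans : List (Option Int)) (idx : Int) : List Int → List (Option Int)
  | [] => ans
  | v :: vs => pvWriteSeq (PySem.List.pySetD ans idx (some v)) (idx + 1) vs

-- the writes of A's first phase (i = a..N-1) and second phase (i = b..2N-1)
def pvF1 (N : Int) (A : List (List Int)) (a : Int) : List Int :=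
  (PySem.List.pyRange a N 1).flatMap (fun i => pvDvals N A 0 i)
def pvF2 (N : Int) (A : List (List Int)) (b : Int) : List Int :=
  (PySem.List.pyRange b (2 * N) 1).flatMap (fun i => pvDvals N A (i - N) (N - 1))

lemma pvWhileA_eq (N : Int) (A : List (List Int)) :
    ∀ (ans : List (Option Int)) (idx k l : Int),
    pvWhileA N A ans idx k l =
      (pvWriteSeq ans idx (pvDvals N A k l), idx + (pvDvals N A k l).length) := by
  intro ans idx k l
  fun_induction pvWhileA N A ans idx k l with
  | case1 ans idx k l h ih =>
    rw [pvDvals, dif_pos h]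
    simp [pvWriteSeq, ih]
    omega
  | case2 ans idx k l h =>
    rw [pvDvals, dif_neg h]
    simp [pvWriteSeq]

lemma pvWriteSeq_fill :
    ∀ (vs w : List Int) (r : Nat), vs.length ≤ r →
    pvWriteSeq ((w.map some) ++ List.replicate r none) (w.length : Int) vs
      = ((w ++ vs).map some) ++ List.replicate (r - vs.length) none := by
  intro vs
  induction vs with
  | nil => intro w r _; simp [pvWriteSeq]
  | cons v vs ih =>
    intro w r hr
    obtain ⟨r', rfl⟩ : ∃ r', r = r' + 1 := ⟨r - 1, by simp at hr; omega⟩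
    rw [pvWriteSeq]
    rw [PySem.List.pySetD_natCast]
    have hset : ((w.map some) ++ List.replicate (r' + 1) none).set w.length (some v)
        = ((w ++ [v]).map some) ++ List.replicate r' none := by
      rw [List.set_append]
      simp [List.replicate_succ]
    rw [hset]
    have hidx : ((w.length : Int) + 1) = (((w ++ [v]).length : Nat) : Int) := by
      simp
    rw [hidx, ih (w ++ [v]) r' (by simp at hr ⊢; omega)]
    simp

lemma pvDvals_eq_range (N : Int) (A : List (List Int)) :
    ∀ (k l : Int),
    pvDvals N A k l =
      (PySem.List.pyRange k (min (k + l) (N - 1) + 1) 1).map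
        (fun r => pvCellA A r (k + l - r)) := by
  intro k l
  fun_induction pvDvals N A k l with
  | case1 k l h ih =>
    rw [PySem.List.pyRange_one_cons (by omega)]
    have h1 : k + 1 + (l - 1) = k + l := by ring
    rw [List.map_cons]
    congr 1
    · simp
    · rw [ih]
      rw [h1]
  | case2 k l h =>
    rw [PySem.List.pyRange_one_eq_nil (by omega)]
    simp

lemma pvDvals_length (N : Int) (A : List (List Int)) (k l : Int) :
    (pvDvals N A k l).length = (min (k + l) (N - 1) + 1 - k).toNat := by
  rw [pvDvals_eq_range, List.length_map, PySem.List.length_pyRange_one]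

lemma pvF1_cons (N : Int) (A : List (List Int)) {a : Int} (h : a < N) :
    pvF1 N A a = pvDvals N A 0 a ++ pvF1 N A (a + 1) := by
  unfold pvF1
  rw [PySem.List.pyRange_one_cons h, List.flatMap_cons]

lemma pvF1_nil (N : Int) (A : List (List Int)) {a : Int} (h : N ≤ a) :
    pvF1 N A a = [] := by
  unfold pvF1
  rw [PySem.List.pyRange_one_eq_nil h, List.flatMap_nil]

lemma pvPart1 (N : Int) (A : List (List Int)) :
    ∀ (cnt : Nat) (a : Int) (w : List Int) (r : Nat),
    (N - a).toNat = cnt → 0 ≤ a → a ≤ N → (pvF1 N A a).length ≤ r →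
    (PySem.List.pyRange a N 1).foldl (pvBodyA N A)
        ((w.map some) ++ List.replicate r none, a, (w.length : Int))
      = (((w ++ pvF1 N A a).map some) ++ List.replicate (r - (pvF1 N A a).length) none,
         (if a = N then a else N - 1),
         (w.length : Int) + (pvF1 N A a).length) := by
  intro cnt
  induction cnt with
  | zero =>
    intro a w r hc h0 haN hr
    have haN' : a = N := by omega
    rw [PySem.List.pyRange_one_eq_nil (le_of_eq haN'.symm), pvF1_nil N A (le_of_eq haN'.symm),
        if_pos haN']
    simp
  | succ cnt ih =>
    intro a w r hc h0 haN hr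
    have haltN : a < N := by omega
    rw [pvF1_cons N A haltN] at hr ⊢
    have hlen : (pvDvals N A 0 a).length ≤ r := by
      simp only [List.length_append] at hr; omega
    rw [PySem.List.pyRange_one_cons haltN, List.foldl_cons]
    have hbody : pvBodyA N A ((w.map some) ++ List.replicate r none, a, (w.length : Int)) a
        = (((w ++ pvDvals N A 0 a).map some) ++ List.replicate (r - (pvDvals N A 0 a).length) none,
           (if a = N - 1 then a else a + 1),
           (((w ++ pvDvals N A 0 a).length : Nat) : Int)) := by
      unfold pvBodyA
      rw [if_neg (by omega), if_pos haltN]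
      simp only [pvWhileA_eq, pvWriteSeq_fill _ _ _ hlen]
      simp
    rw [hbody]
    by_cases hedge : a = N - 1
    · subst hedge
      rw [PySem.List.pyRange_one_eq_nil (by omega), List.foldl_nil,
          pvF1_nil N A (by omega)]
      simp [show ¬(N - 1 = N) from by omega, List.length_append]
    · rw [if_neg hedge]
      rw [ih (a + 1) (w ++ pvDvals N A 0 a) (r - (pvDvals N A 0 a).length)
            (by omega) (by omega) (by omega)
            (by simp only [List.length_append] at hr; omega)]
      simp only [Prod.mk.injEq]
      refine ⟨?_, ?_, ?_⟩
      · rw [List.append_assoc]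
        congr 2
        simp only [List.length_append]
        omega
      · rw [if_neg (by omega)]
        omega
      · simp only [List.length_append]
        push_cast
        ring

lemma pvF2_cons (N : Int) (A : List (List Int)) {b : Int} (h : b < 2 * N) :
    pvF2 N A b = pvDvals N A (b - N) (N - 1) ++ pvF2 N A (b + 1) := by
  unfold pvF2
  rw [PySem.List.pyRange_one_cons h, List.flatMap_cons]

lemma pvF2_nil (N : Int) (A : List (List Int)) {b : Int} (h : 2 * N ≤ b) :
    pvF2 N A b = [] := by
  unfold pvF2
  rw [PySem.List.pyRange_one_eq_nil h, List.flatMap_nil]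

lemma pvPart2 (N : Int) (A : List (List Int)) :
    ∀ (cnt : Nat) (b : Int) (w : List Int) (r : Nat),
    (2 * N - b).toNat = cnt → N < b → (pvF2 N A b).length ≤ r →
    (PySem.List.pyRange b (2 * N) 1).foldl (pvBodyA N A)
        ((w.map some) ++ List.replicate r none, N - 1, (w.length : Int))
      = (((w ++ pvF2 N A b).map some) ++ List.replicate (r - (pvF2 N A b).length) none,
         N - 1,
         (w.length : Int) + (pvF2 N A b).length) := by
  intro cnt
  induction cnt with
  | zero =>
    intro b w r hc hb hr
    rw [PySem.List.pyRange_one_eq_nil (by omega), pvF2_nil N A (by omega)]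
    simp
  | succ cnt ih =>
    intro b w r hc hb hr
    have hb2 : b < 2 * N := by omega
    rw [pvF2_cons N A hb2] at hr ⊢
    have hlen : (pvDvals N A (b - N) (N - 1)).length ≤ r := by
      simp only [List.length_append] at hr; omega
    rw [PySem.List.pyRange_one_cons hb2, List.foldl_cons]
    have hmod : PySem.Int.mod b N = b - N := by
      rw [PySem.Int.mod_eq_emod_of_pos (by omega)]
      calc b % N = (b - N) % N := (Int.sub_emod_right b N).symm
        _ = b - N := Int.emod_eq_of_lt (by omega) (by omega)
    have hbody : pvBodyA N A ((w.map some) ++ List.replicate r none, N - 1, (w.length : Int)) b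
        = (((w ++ pvDvals N A (b - N) (N - 1)).map some)
             ++ List.replicate (r - (pvDvals N A (b - N) (N - 1)).length) none,
           N - 1,
           (((w ++ pvDvals N A (b - N) (N - 1)).length : Nat) : Int)) := by
      unfold pvBodyA
      rw [if_neg (by omega), if_neg (by omega), hmod]
      simp only [pvWhileA_eq, pvWriteSeq_fill _ _ _ hlen]
      simp
    rw [hbody]
    rw [ih (b + 1) (w ++ pvDvals N A (b - N) (N - 1)) (r - (pvDvals N A (b - N) (N - 1)).length)
          (by omega) (by omega)
          (by simp only [List.length_append] at hr; omega)]
    simp only [Prod.mk.injEq]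
    refine ⟨?_, trivial, ?_⟩
    · rw [List.append_assoc]
      congr 2
      simp only [List.length_append]
      omega
    · simp only [List.length_append]
      push_cast
      ring

lemma pvDiagCatSplit (N : Int) (A : List (List Int)) (h : 1 ≤ N) :
    pvDiagCat N A = pvF1 N A 0 ++ pvF2 N A (N + 1) := by
  unfold pvDiagCat
  rw [PySem.List.pyRange_one_append 0 N (2 * N - 1) (by omega) (by omega), List.flatMap_append]
  congr 1
  · unfold pvF1
    rw [List.flatMap_def, List.flatMap_def]
    congr 1
    apply List.map_congr_left
    intro d hd
    rw [PySem.List.mem_pyRange_one] at hd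
    have h2 : max 0 (d - N + 1) = 0 := by omega
    rw [h2]
    congr 1
    omega
  · unfold pvF2
    rw [PySem.List.pyRange_one (a := N) (b := 2 * N - 1),
        PySem.List.pyRange_one (a := N + 1) (b := 2 * N)]
    rw [List.flatMap_map, List.flatMap_map]
    have hm : (2 * N - 1 - N).toNat = (2 * N - (N + 1)).toNat := by omega
    rw [hm]
    congr 1
    funext k
    have h2 : max 0 (N + (k : Int) - N + 1) = (k : Int) + 1 := by omega
    rw [h2]
    congr 1 <;> omega

lemma pvSumBridge (f : Nat → Nat) : ∀ n : Nat, ((List.range n).map f).sum = ∑ i ∈ Finset.range n, f i := by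
  intro n
  induction n with
  | zero => simp
  | succ n ih =>
    rw [List.range_succ, List.map_append, List.sum_append, Finset.sum_range_succ, ih]
    simp

lemma pvT_mul_two : ∀ r : Nat, (∑ i ∈ Finset.range r, (i + 1)) * 2 = r * (r + 1) := by
  intro r
  induction r with
  | zero => simp
  | succ r ih =>
    rw [Finset.sum_range_succ, Nat.add_mul, ih]
    ring

lemma pvLenTotal (N : Int) (A : List (List Int)) (h : 1 ≤ N) :
    (pvF1 N A 0).length + (pvF2 N A (N + 1)).length = (N * N).toNat := by
  obtain ⟨n, rfl⟩ : ∃ n : Nat, N = (n : Int) := ⟨N.toNat, (Int.toNat_of_nonneg (by omega)).symm⟩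
  have hn1 : 1 ≤ n := by exact_mod_cast h
  have h1 : (pvF1 (n : Int) A 0).length = ∑ i ∈ Finset.range n, (i + 1) := by
    unfold pvF1
    rw [List.length_flatMap, PySem.List.pyRange_one, List.map_map]
    rw [show (((n : Int)) - 0).toNat = n by omega]
    have : ∀ k ∈ List.range n, ((fun a => (pvDvals (n : Int) A 0 a).length) ∘ fun k : Nat => 0 + (k : Int)) k = k + 1 := by
      intro k hk
      rw [List.mem_range] at hk
      have hkN : (k : Int) < (n : Int) := by exact_mod_cast hk
      simp only [Function.comp, zero_add]
      rw [pvDvals_length]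
      omega
    rw [List.map_congr_left this, pvSumBridge]
  have h2 : (pvF2 (n : Int) A ((n : Int) + 1)).length = ∑ i ∈ Finset.range (n - 1), ((n - 1) - i) := by
    unfold pvF2
    rw [List.length_flatMap, PySem.List.pyRange_one, List.map_map]
    rw [show ((2 * (n : Int)) - ((n : Int) + 1)).toNat = n - 1 by omega]
    have : ∀ k ∈ List.range (n - 1), ((fun a => (pvDvals (n : Int) A (a - (n : Int)) ((n : Int) - 1)).length) ∘ fun k : Nat => ((n : Int) + 1) + (k : Int)) k = (n - 1) - k := by
      intro k hk
      rw [List.mem_range] at hk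
      have hkN : (k : Int) < (n : Int) - 1 := by omega
      simp only [Function.comp]
      rw [pvDvals_length]
      omega
    rw [List.map_congr_left this, pvSumBridge]
  rw [h1, h2]
  have h3 : ∑ i ∈ Finset.range (n - 1), ((n - 1) - i) = ∑ i ∈ Finset.range (n - 1), (i + 1) := by
    rw [← Finset.sum_range_reflect (fun j => j + 1) (n - 1)]
    apply Finset.sum_congr rfl
    intro i hi
    rw [Finset.mem_range] at hi
    omega
  rw [h3]
  have hNn : (((n : Int)) * (n : Int)).toNat = n * n := by
    rw [← Nat.cast_mul, Int.toNat_natCast]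
  rw [hNn]
  have g1 := pvT_mul_two n
  have g2 := pvT_mul_two (n - 1)
  obtain ⟨t, rfl⟩ : ∃ t, n = t + 1 := ⟨n - 1, by omega⟩
  simp only [Nat.add_sub_cancel] at g2 ⊢
  apply Nat.eq_of_mul_eq_mul_right (show 0 < 2 by norm_num)
  rw [Nat.add_mul, g1, g2]
  ring

lemma pvA_eq_diagCat (N : Int) (A : List (List Int)) (hN0 : 0 ≤ N) :
    downwardDigonal N A = pvDiagCat N A := by
  by_cases hN : N = 0
  · subst hN
    norm_num [downwardDigonal, pvDiagCat, PySem.List.pyRange_one_eq_nil]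
  · have h1 : 1 ≤ N := by omega
    have hLen := pvLenTotal N A h1
    unfold downwardDigonal
    have hans0 : (PySem.List.pyRange 0 (N * N) 1).map (fun _ => (none : Option Int))
        = List.replicate ((N * N).toNat) none := by
      rw [List.map_const', PySem.List.length_pyRange_one]
      simp
    rw [hans0]
    rw [PySem.List.pyRange_one_append 0 N (2 * N) (by omega) (by omega)]
    simp only [List.foldl_append]
    have key1 := pvPart1 N A (N - 0).toNat 0 [] ((N * N).toNat) rfl (by omega) (by omega)
      (by omega)
    simp only [List.length_nil, Nat.cast_zero, List.map_nil, List.nil_append, zero_add] at key1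
    rw [key1]
    rw [PySem.List.pyRange_one_cons (show N < 2 * N by omega), List.foldl_cons]
    have hskip : ∀ st : List (Option Int) × Int × Int, pvBodyA N A st N = st := by
      intro st; unfold pvBodyA; rw [if_pos rfl]
    rw [hskip]
    rw [if_neg (show ¬(0 : Int) = N by omega)]
    have key2 := pvPart2 N A (2 * N - (N + 1)).toNat (N + 1) (pvF1 N A 0)
      ((N * N).toNat - (pvF1 N A 0).length) rfl (by omega) (by omega)
    rw [key2]
    rw [show (N * N).toNat - (pvF1 N A 0).length - (pvF2 N A (N + 1)).length = 0 by omega]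
    rw [pvDiagCatSplit N A h1]
    simp [List.map_map]

-- ---- B-side: downwardDigonal_alt = pvDiagCat ----

-- abstract view of the bucket list as a function on indices
def pvModel (M : Nat) (g : Nat → List Int) : List (List Int) := (List.range M).map g

lemma pvModel_getD (M : Nat) (g : Nat → List Int) (i : Nat) (h : i < M) :
    PySem.List.pyGetD (pvModel M g) ((i : Nat) : Int) [] = g i := by
  rw [PySem.List.pyGetD_natCast]
  unfold pvModel
  rw [List.getD_eq_getElem?_getD, List.getElem?_map, List.getElem?_range h]
  rfl

lemma pvModel_append (M : Nat) (g : Nat → List Int) (i : Nat) (v : Int) (h : i < M) :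
    pvAppendAt (pvModel M g) ((i : Nat) : Int) v
      = pvModel M (fun d => if d = i then g d ++ [v] else g d) := by
  unfold pvAppendAt
  rw [PySem.List.pySetD_natCast, pvModel_getD M g i h]
  apply List.ext_getElem
  · simp [pvModel]
  · intro j hj hj'
    simp only [pvModel, List.length_map, List.length_range, List.length_set] at hj hj'
    simp only [pvModel, List.getElem_set, List.getElem_map, List.getElem_range]
    by_cases hji : i = j
    · subst hji; simp
    · rw [if_neg hji, if_neg (fun h' => hji (Eq.symm h'))]

lemma pvInner (M : Nat) (A : List (List Int)) (R : Nat) :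
    ∀ (cs : List Nat) (g : Nat → List Int), (∀ c ∈ cs, R + c < M) →
    cs.foldl (fun bs (c : Nat) => pvAppendAt bs ((R : Int) + (c : Int)) (pvCellB A (R : Int) (c : Int)))
        (pvModel M g)
      = pvModel M (fun d => g d ++
          ((cs.filter (fun c => R + c == d)).map (fun (c : Nat) => pvCellB A (R : Int) (c : Int)))) := by
  intro cs
  induction cs with
  | nil => intro g _; simp [pvModel]
  | cons c cs ih =>
    intro g hmem
    have hc : R + c < M := hmem c (by simp)
    show cs.foldl _ (pvAppendAt (pvModel M g) ((R : Int) + (c : Int))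
        (pvCellB A (R : Int) (c : Int))) = _
    rw [show (R : Int) + (c : Int) = ((R + c : Nat) : Int) by push_cast; ring,
        pvModel_append M g (R + c) _ hc,
        ih _ (fun c' hc' => hmem c' (by simp [hc']))]
    unfold pvModel
    congr 1
    funext d
    by_cases hd : R + c = d
    · subst hd
      simp
    · have hd' : ¬ (d = R + c) := fun h' => hd h'.symm
      simp [hd, hd']

lemma pvOuter (M nN : Nat) (A : List (List Int)) :
    ∀ (rs : List Nat) (g : Nat → List Int), (∀ r ∈ rs, r + nN ≤ M) →
    rs.foldl (fun bs (r : Nat) =>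
        (List.range nN).foldl (fun bs' (c : Nat) =>
          pvAppendAt bs' ((r : Int) + (c : Int)) (pvCellB A (r : Int) (c : Int))) bs)
      (pvModel M g)
      = pvModel M (fun d => g d ++
          rs.flatMap (fun r =>
            ((List.range nN).filter (fun c => r + c == d)).map
              (fun (c : Nat) => pvCellB A (r : Int) (c : Int)))) := by
  intro rs
  induction rs with
  | nil => intro g _; simp [pvModel]
  | cons r rs ih =>
    intro g hmem
    show rs.foldl _ ((List.range nN).foldl (fun bs' (c : Nat) =>
        pvAppendAt bs' ((r : Int) + (c : Int)) (pvCellB A (r : Int) (c : Int)))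
        (pvModel M g)) = _
    rw [pvInner M A r (List.range nN) g (fun c hc => by
          have h1 := hmem r (by simp)
          rw [List.mem_range] at hc
          omega),
        ih _ (fun r' hr' => hmem r' (by simp [hr']))]
    unfold pvModel
    congr 1
    funext d
    simp [List.append_assoc]

lemma pvFilterRange (n r d : Nat) :
    (List.range n).filter (fun c => r + c == d) = if r ≤ d ∧ d < r + n then [d - r] else [] := by
  induction n with
  | zero =>
    rw [if_neg (by omega)]
    simp
  | succ n ih =>
    rw [List.range_succ, List.filter_append, ih, List.filter_cons, List.filter_nil]
    by_cases h1 : r + n = d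
    · rw [if_neg (by omega), if_pos (by simp [h1]), if_pos (by omega)]
      simp [show d - r = n by omega]
    · rw [if_neg (show ¬((r + n == d) = true) by simp [h1])]
      by_cases h2 : r ≤ d ∧ d < r + n
      · rw [if_pos h2, if_pos (by omega)]
        simp
      · rw [if_neg h2, if_neg (by omega)]
        simp

lemma pvFlatMapNil {α β : Type} (l : List α) (f : α → List β) (h : ∀ x ∈ l, f x = []) :
    l.flatMap f = [] := by
  induction l with
  | nil => simp
  | cons x l ih =>
    rw [List.flatMap_cons, h x (by simp), ih (fun y hy => h y (by simp [hy]))]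
    simp

lemma pvFlatSingle {α β : Type} (f : α → β) :
    ∀ l : List α, (l.map (fun a => [f a])).flatten = l.map f := by
  intro l
  induction l with
  | nil => simp
  | cons a l ih => simp [ih]

lemma pvBucketDiag (n d : Nat) (A : List (List Int)) (hn : 1 ≤ n) (hd : d < 2 * n - 1) :
    (List.range n).flatMap (fun r =>
        ((List.range n).filter (fun c => r + c == d)).map
          (fun (c : Nat) => pvCellB A (r : Int) (c : Int)))
      = pvDvals (n : Int) A (max 0 ((d : Int) - n + 1)) ((d : Int) - max 0 ((d : Int) - n + 1)) := by
  -- left side: each row r contributes [A[r][d-r]] iff r is in the diagonal's row window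
  have hstep : ∀ r ∈ List.range n,
      ((List.range n).filter (fun c => r + c == d)).map
          (fun (c : Nat) => pvCellB A (r : Int) (c : Int))
        = if (d + 1 - n) ≤ r ∧ r ≤ min d (n - 1) then [pvCellB A (r : Int) ((d - r : Nat) : Int)] else [] := by
    intro r hr
    rw [List.mem_range] at hr
    rw [pvFilterRange n r d]
    by_cases h1 : r ≤ d ∧ d < r + n
    · rw [if_pos h1, if_pos (by omega)]
      simp
    · rw [if_neg h1, if_neg (by omega)]
      simp
  rw [List.flatMap_def, List.map_congr_left hstep, ← List.flatMap_def]
  -- split range n at lo := d+1-n and hi := min d (n-1)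
  set lo := d + 1 - n with hlo
  set hi := min d (n - 1) with hhi
  have hlohi : lo ≤ hi := by omega
  have hhin : hi < n := by omega
  have hsplit1 : n = (hi + 1) + (n - (hi + 1)) := by omega
  conv_lhs => rw [hsplit1, List.range_add]
  rw [List.flatMap_append]
  have htail : ((List.range (n - (hi + 1))).map (fun k => (hi + 1) + k)).flatMap
      (fun r => if lo ≤ r ∧ r ≤ hi then [pvCellB A (r : Int) ((d - r : Nat) : Int)] else [])
      = [] := by
    apply pvFlatMapNil
    intro x hx
    simp only [List.mem_map, List.mem_range] at hx
    obtain ⟨k, hk, rfl⟩ := hx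
    rw [if_neg (by omega)]
  rw [htail, List.append_nil]
  have hsplit2 : hi + 1 = lo + (hi + 1 - lo) := by omega
  conv_lhs => rw [hsplit2, List.range_add]
  rw [List.flatMap_append]
  have hhead : (List.range lo).flatMap
      (fun r => if lo ≤ r ∧ r ≤ hi then [pvCellB A (r : Int) ((d - r : Nat) : Int)] else [])
      = [] := by
    apply pvFlatMapNil
    intro x hx
    rw [List.mem_range] at hx
    rw [if_neg (by omega)]
  rw [hhead, List.nil_append]
  have hmid : ((List.range (hi + 1 - lo)).map (fun k => lo + k)).flatMap
      (fun r => if lo ≤ r ∧ r ≤ hi then [pvCellB A (r : Int) ((d - r : Nat) : Int)] else [])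
      = (List.range (hi + 1 - lo)).map
          (fun k => pvCellB A ((lo + k : Nat) : Int) ((d - (lo + k) : Nat) : Int)) := by
    rw [List.flatMap_map]
    have : ∀ k ∈ List.range (hi + 1 - lo),
        (fun r => if lo ≤ r ∧ r ≤ hi then [pvCellB A (r : Int) ((d - r : Nat) : Int)] else [])
          (lo + k)
        = [pvCellB A ((lo + k : Nat) : Int) ((d - (lo + k) : Nat) : Int)] := by
      intro k hk
      rw [List.mem_range] at hk
      have hcond : lo ≤ lo + k ∧ lo + k ≤ hi := by omega
      simp [hcond]
    rw [List.flatMap_def, List.map_congr_left this]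
    exact pvFlatSingle _ _
  rw [hmid]
  -- right side: pvDvals as a pyRange map
  rw [pvDvals_eq_range]
  have hmax : max 0 ((d : Int) - n + 1) = ((lo : Nat) : Int) := by
    simp only [hlo]
    omega
  have hsum : max 0 ((d : Int) - n + 1) + ((d : Int) - max 0 ((d : Int) - n + 1)) = (d : Int) := by
    omega
  rw [hsum, hmax, PySem.List.pyRange_one]
  have hcnt : (min (d : Int) ((n : Int) - 1) + 1 - (lo : Nat)).toNat = hi + 1 - lo := by
    omega
  rw [hcnt, List.map_map]
  apply List.map_congr_left
  intro k hk
  rw [List.mem_range] at hk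
  simp only [Function.comp]
  have e1 : ((lo + k : Nat) : Int) = ((lo : Nat) : Int) + (k : Int) := by push_cast; ring
  have e2 : ((d - (lo + k) : Nat) : Int) = (d : Int) - (((lo : Nat) : Int) + (k : Int)) := by
    omega
  simp only [pvCellA, pvCellB]
  rw [e1, e2]

lemma pvB_eq_diagCat (N : Int) (A : List (List Int)) (hN0 : 0 ≤ N) :
    downwardDigonal_alt N A = pvDiagCat N A := by
  obtain ⟨n, rfl⟩ : ∃ n : Nat, N = (n : Int) := ⟨N.toNat, (Int.toNat_of_nonneg hN0).symm⟩
  by_cases hn : n = 0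
  · subst hn
    norm_num [downwardDigonal_alt, pvDiagCat, PySem.List.pyRange_one_eq_nil]
  · have hn1 : 1 ≤ n := by omega
    set M : Nat := 2 * n - 1 with hM
    unfold downwardDigonal_alt
    have h0 : (PySem.List.pyRange 0 (2 * (n : Int) - 1) 1).map (fun _ => ([] : List Int))
        = pvModel M (fun _ => []) := by
      unfold pvModel
      rw [PySem.List.pyRange_one, List.map_map,
          show ((2 * (n : Int) - 1) - 0).toNat = M by omega]
      rfl
    rw [h0]
    have hr : PySem.List.pyRange 0 (n : Int) 1 = (List.range n).map (fun k : Nat => (k : Int)) := by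
      rw [PySem.List.pyRange_one]
      rw [show (((n : Int)) - 0).toNat = n by omega]
      simp
    rw [hr]
    simp only [List.foldl_map]
    rw [pvOuter M n A (List.range n) (fun _ => []) (fun r hrr => by
      rw [List.mem_range] at hrr; omega)]
    rw [PySem.List.foldl_append_eq_flatten]
    unfold pvDiagCat pvModel
    rw [List.nil_append, ← List.flatMap_def,
        PySem.List.pyRange_one 0 (2 * (n : Int) - 1),
        show ((2 * (n : Int) - 1) - 0).toNat = M by omega,
        List.flatMap_map]
    rw [List.flatMap_def, List.flatMap_def]
    congr 1
    apply List.map_congr_left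
    intro d hd
    rw [List.mem_range] at hd
    simp only [List.nil_append, zero_add]
    exact pvBucketDiag n d A hn1 (by omega)

-- ===== VERDICT (by name: the statement is the Claim_ definition above) =====
theorem downwardDigonal_spec : Claim_equal_downwardDigonal := by
  intro N A _ hPre
  obtain ⟨hN0, -, -⟩ := hPre
  unfold Spec_downwardDigonal
  rw [pvA_eq_diagCat N A hN0, pvB_eq_diagCat N A hN0]
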